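-- pv_equiv track=rewrite | github.com/hkust-nlp/model-task-align-rl | SynLogic/games/tasks/star_placement_puzzle/scripts/star_placement_puzzle.py | _verify_region_grid
-- ===== SOURCE A (Python) =====
-- def _verify_region_grid(n, k, region_grid, stars):
--     """
--     验证区域网格是否有效
--
--     @param n: 网格大小
--     @param k: 每个区域的星星数量
--     @param region_grid: 区域网格
--     @param stars: 星星位置集合
--     @return: 布尔值，指示区域网格是否有效
--     """
--     # 检查每个区域的星星数量
--     regions = {}
--     for r in range(n):
--         for c in range(n):
--             region = region_grid[r][c]
--             if region not in regions:
--                 regions[region] = []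
--             regions[region].append((r, c))
--
--     for region, cells in regions.items():
--         region_stars = sum(1 for r, c in cells if (r, c) in stars)
--         if region_stars != k:
--             return False
--
--     # 检查所有格子都已分配区域
--     for r in range(n):
--         for c in range(n):
--             if not region_grid[r][c]:
--                 return False
--
--     return True
-- ===== SOURCE B (Python) =====
-- def _verify_region_grid(n, k, region_grid, stars):
--     # Count stars per region by iterating over the stars themselves (guarded to the
--     # n x n window), then one pass over the grid window collecting labels / empties.
--     counts = {}
--     for (r, c) in set(stars):
--         if 0 <= r < n and 0 <= c < n:
--             lab = region_grid[r][c]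
--             counts[lab] = counts.get(lab, 0) + 1
--     labels = set()
--     any_empty = False
--     for row in region_grid[:n]:
--         for lab in row[:n]:
--             labels.add(lab)
--             if not lab:
--                 any_empty = True
--     for lab in labels:
--         if counts.get(lab, 0) != k:
--             return False
--     return not any_empty
-- ===== Notes on version B (the rewrite author's own statement) =====
-- stated objective: alternative
-- what changed: Instead of building per-region cell lists over the n x n grid and membership-testing every cell against the stars, B iterates over the star set itself, incrementing a per-region counter for window-guarded stars, then makes one slice-based pass over the grid to collect the label set and an empty-cell flag, and finally compares each label's count with k.
-- outside the precondition, e.g. on _verify_region_grid(-1, 1, [['A', 'A'], ['A', 'A']], set()): A returns True, B returns False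
import Mathlib
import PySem

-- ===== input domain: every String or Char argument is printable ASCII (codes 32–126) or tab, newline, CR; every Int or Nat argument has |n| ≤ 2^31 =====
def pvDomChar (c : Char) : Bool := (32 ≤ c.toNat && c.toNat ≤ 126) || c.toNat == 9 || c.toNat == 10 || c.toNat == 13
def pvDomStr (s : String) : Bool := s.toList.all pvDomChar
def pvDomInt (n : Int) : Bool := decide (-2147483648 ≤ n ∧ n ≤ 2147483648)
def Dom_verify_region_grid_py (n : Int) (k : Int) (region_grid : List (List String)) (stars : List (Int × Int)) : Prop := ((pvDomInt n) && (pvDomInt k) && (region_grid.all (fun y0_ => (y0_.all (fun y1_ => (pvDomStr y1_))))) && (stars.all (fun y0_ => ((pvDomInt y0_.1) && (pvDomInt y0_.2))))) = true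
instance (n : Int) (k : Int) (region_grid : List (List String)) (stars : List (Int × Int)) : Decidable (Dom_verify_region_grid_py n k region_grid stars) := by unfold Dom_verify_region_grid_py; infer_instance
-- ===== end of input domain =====

-- B counts stars per region by iterating over the star set itself (window-guarded) instead of
-- building per-region cell lists and membership-testing every grid cell; objective: alternative.

-- ===== PORT A =====
def verify_region_grid_py (n : Int) (k : Int) (region_grid : List (List String)) (stars : List (Int × Int)) : Bool :=
  -- regions = {}; for r in range(n): for c in range(n): regions.setdefault(region,[]).append((r,c))
  let rng := PySem.List.pyRange 0 n 1
  let regions : PySem.Dict String (List (Int × Int)) :=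
    rng.foldl (fun d r =>
      rng.foldl (fun d c =>
        d.modify (PySem.List.pyGetD (PySem.List.pyGetD region_grid r []) c "") []
          (fun l => l ++ [(r, c)])) d)
      PySem.Dict.empty
  -- for region, cells in regions.items(): if sum(1 for rc in cells if rc in stars) != k: return False
  if regions.items.all (fun p =>
      ((p.2.countP (fun rc => stars.contains rc) : Int) == k)) then
    -- for r in range(n): for c in range(n): if not region_grid[r][c]: return False
    rng.all (fun r => rng.all (fun c =>
      !(PySem.List.pyGetD (PySem.List.pyGetD region_grid r []) c "" == "")))
  else false

-- ===== PORT B =====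
def verify_region_grid_py_alt (n : Int) (k : Int) (region_grid : List (List String)) (stars : List (Int × Int)) : Bool :=
  -- counts = {}; for (r,c) in set(stars): if in window: counts[lab] = counts.get(lab,0)+1
  let counts : PySem.Dict String Int :=
    (PySem.Set.ofList stars).foldl (fun d rc =>
      if 0 ≤ rc.1 ∧ rc.1 < n ∧ 0 ≤ rc.2 ∧ rc.2 < n then
        let lab := PySem.List.pyGetD (PySem.List.pyGetD region_grid rc.1 []) rc.2 ""
        d.insert lab (d.getD lab 0 + 1)
      else d) PySem.Dict.empty
  -- labels = set(); any_empty = False; for row in region_grid[:n]: for lab in row[:n]: ...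
  let st := (PySem.List.slice region_grid none (some n)).foldl
      (fun (p : PySem.Set String × Bool) row =>
        (PySem.List.slice row none (some n)).foldl
          (fun p lab => (PySem.Set.add p.1 lab, p.2 || (lab == ""))) p)
      (PySem.Set.empty, false)
  -- for lab in labels: if counts.get(lab,0) != k: return False;  return not any_empty
  (st.1.all (fun lab => counts.getD lab 0 == k)) && !st.2

-- ===== PRECONDITION & SPEC =====
-- Pre_ excludes (a) grids too short for n, where A raises IndexError, and (b) negative n,
-- where A's vacuous True is an accident of range(n): B slices region_grid[:n] there.
def Pre_verify_region_grid_py (n : Int) (k : Int) (region_grid : List (List String)) (stars : List (Int × Int)) : Prop :=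
  0 ≤ n ∧ n ≤ (region_grid.length : Int) ∧
    ∀ row ∈ region_grid.take n.toNat, n ≤ (row.length : Int)
instance (n : Int) (k : Int) (region_grid : List (List String)) (stars : List (Int × Int)) : Decidable (Pre_verify_region_grid_py n k region_grid stars) := by unfold Pre_verify_region_grid_py; infer_instance

def pvWitness_verify_region_grid_py : Int × Int × List (List String) × (List (Int × Int)) :=
  (1, 1, [["A"]], [(0, 0)])

def Spec_verify_region_grid_py (n : Int) (k : Int) (region_grid : List (List String)) (stars : List (Int × Int)) (out : Bool) : Prop := out = verify_region_grid_py_alt n k region_grid stars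
instance (n : Int) (k : Int) (region_grid : List (List String)) (stars : List (Int × Int)) (out : Bool) : Decidable (Spec_verify_region_grid_py n k region_grid stars out) := by unfold Spec_verify_region_grid_py; infer_instance

-- ===== CLAIM (what is proved, stated in full; the proofs are below) =====
def Claim_equal_verify_region_grid_py : Prop := ∀ (n : Int) (k : Int) (region_grid : List (List String)) (stars : List (Int × Int)), Dom_verify_region_grid_py n k region_grid stars → Pre_verify_region_grid_py n k region_grid stars → Spec_verify_region_grid_py n k region_grid stars (verify_region_grid_py n k region_grid stars)

-- ===== LEMMAS AND PROOFS =====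

-- window coordinates and the label read at a coordinate (proof-side names for the ports' expressions)
def pvCells (n : Int) : List (Int × Int) :=
  (PySem.List.pyRange 0 n 1) ×ˢ (PySem.List.pyRange 0 n 1)

def pvLab (g : List (List String)) (rc : Int × Int) : String :=
  PySem.List.pyGetD (PySem.List.pyGetD g rc.1 []) rc.2 ""



theorem pv_foldl_nest {α β γ : Type} (xs : List β) (ys : List γ) (f : α → β → γ → α) (a : α) :
    xs.foldl (fun a r => ys.foldl (fun a c => f a r c) a) a
      = (xs ×ˢ ys).foldl (fun a rc => f a rc.1 rc.2) a := by
  induction xs generalizing a with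
  | nil => rfl
  | cons x xs ih => simp [List.product_cons, List.foldl_append, List.foldl_map, ih]

theorem pv_all_nest {β γ : Type} (xs : List β) (ys : List γ) (p : β → γ → Bool) :
    (xs.all fun r => ys.all fun c => p r c) = (xs ×ˢ ys).all (fun rc => p rc.1 rc.2) := by
  induction xs with
  | nil => rfl
  | cons x xs ih => simp [List.product_cons, List.all_append, List.all_map, ih, Function.comp_def]

theorem pv_map_product {α β γ : Type} (xs : List α) (ys : List β) (f : α × β → γ) :
    (xs ×ˢ ys).map f = xs.flatMap (fun a => ys.map (fun b => f (a, b))) := by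
  induction xs with
  | nil => rfl
  | cons x xs ih =>
      simp [List.product_cons, List.map_append, List.map_map, ih, List.flatMap_cons,
        Function.comp_def]

theorem pv_foldl_ite_filter {α β : Type} (p : β → Prop) [DecidablePred p]
    (f : α → β → α) (l : List β) (a : α) :
    l.foldl (fun a x => if p x then f a x else a) a
      = (l.filter (fun x => decide (p x))).foldl f a := by
  induction l generalizing a with
  | nil => rfl
  | cons x xs ih =>
      by_cases h : p x <;> simp [h, ih]

theorem pv_foldl_or {α : Type} (l : List α) (p : α → Bool) (b : Bool) :
    l.foldl (fun b x => b || p x) b = (b || l.any p) := by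
  induction l generalizing b with
  | nil => simp
  | cons x xs ih => simp [ih, Bool.or_assoc]

theorem pv_regions_getD (n : Int) (g : List (List String)) (L : String) :
    ((pvCells n).foldl (fun d rc => d.modify (pvLab g rc) [] (fun l => l ++ [rc]))
        PySem.Dict.empty).getD L []
      = (pvCells n).filter (fun rc => pvLab g rc == L) := by
  have h := PySem.Dict.getD_foldl_modify_append
    ((pvCells n).map (fun rc => (pvLab g rc, rc))) (PySem.Dict.empty) L
  rw [List.foldl_map] at h
  simpa [List.filter_map, Function.comp_def] using h

theorem pv_regions_keys (n : Int) (g : List (List String)) :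
    ((pvCells n).foldl (fun d rc => d.modify (pvLab g rc) [] (fun l => l ++ [rc]))
        PySem.Dict.empty).keys
      = PySem.Set.ofList ((pvCells n).map (pvLab g)) := by
  have h := PySem.Dict.keys_foldl_modify_key (pvCells n) (pvLab g)
    ([] : List (Int × Int)) (fun _ rc => fun l => l ++ [rc]) (PySem.Dict.empty)
  rw [PySem.Set.ofList_eq_foldl]
  simpa [PySem.Set.update] using h

theorem pv_regions_nodup (n : Int) (g : List (List String)) :
    ((pvCells n).foldl (fun d rc => d.modify (pvLab g rc) [] (fun l => l ++ [rc]))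
        PySem.Dict.empty).keys.Nodup := by
  exact PySem.Dict.nodup_keys_foldl_modify_key (pvCells n) (pvLab g)
    ([] : List (Int × Int)) (fun _ rc => fun l => l ++ [rc]) (PySem.Dict.empty)
    (by simp [PySem.Dict.empty, PySem.Dict.keys])

theorem pv_A_eq (n k : Int) (g : List (List String)) (stars : List (Int × Int)) :
    verify_region_grid_py n k g stars =
      (((PySem.Set.ofList ((pvCells n).map (pvLab g))).all (fun L =>
          ((((pvCells n).filter (fun rc => pvLab g rc == L)).countP
              (fun rc => stars.contains rc) : Int) == k)))
        && (pvCells n).all (fun rc => !(pvLab g rc == ""))) := by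
  simp only [verify_region_grid_py]
  rw [pv_foldl_nest (PySem.List.pyRange 0 n 1) (PySem.List.pyRange 0 n 1)
    (fun d r c => PySem.Dict.modify d (PySem.List.pyGetD (PySem.List.pyGetD g r []) c "") []
      (fun l => l ++ [(r, c)])) PySem.Dict.empty]
  rw [pv_all_nest (PySem.List.pyRange 0 n 1) (PySem.List.pyRange 0 n 1)
    (fun r c => !(PySem.List.pyGetD (PySem.List.pyGetD g r []) c "" == ""))]
  rw [show ((PySem.List.pyRange 0 n 1) ×ˢ (PySem.List.pyRange 0 n 1)) = pvCells n from rfl]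
  have hfold : ((pvCells n).foldl
      (fun d rc => PySem.Dict.modify d (PySem.List.pyGetD (PySem.List.pyGetD g rc.1 []) rc.2 "") []
        (fun l => l ++ [(rc.1, rc.2)])) PySem.Dict.empty)
      = ((pvCells n).foldl (fun d rc => d.modify (pvLab g rc) [] (fun l => l ++ [rc]))
        PySem.Dict.empty) := by
    simp [pvLab]
  rw [hfold]
  rw [PySem.Dict.items_eq_map_keys _ (pv_regions_nodup n g) ([] : List (Int × Int))]
  rw [List.all_map, pv_regions_keys]
  have hAll := List.all_congr (rfl : PySem.Set.ofList ((pvCells n).map (pvLab g)) = _)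
    (p := ((fun p : String × List (Int × Int) =>
        ((p.2.countP (fun rc => stars.contains rc) : Int) == k)) ∘
      (fun K => (K, ((pvCells n).foldl
        (fun d rc => d.modify (pvLab g rc) [] (fun l => l ++ [rc]))
          PySem.Dict.empty).getD K []))))
    (q := fun L => ((((pvCells n).filter (fun rc => pvLab g rc == L)).countP
        (fun rc => stars.contains rc) : Int) == k))
    (fun L => by simp only [Function.comp_def]; rw [pv_regions_getD])
  rw [hAll]
  cases h : ((PySem.Set.ofList ((pvCells n).map (pvLab g))).all (fun L =>
      ((((pvCells n).filter (fun rc => pvLab g rc == L)).countP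
          (fun rc => stars.contains rc) : Int) == k))) <;> simp [pvLab]

theorem pv_take_eq_map_range {α : Type} (l : List α) (d : α) (m : Nat) (hm : m ≤ l.length) :
    l.take m = (List.range m).map (fun i => l.getD i d) := by
  apply List.ext_getElem
  · simp [Nat.min_eq_left hm]
  · intro i h1 h2
    have hi : i < m := by simpa using h2
    have hil : i < l.length := lt_of_lt_of_le hi hm
    simp [List.getElem_take, List.getElem?_eq_getElem hil]

theorem pv_flat_eq (n : Int) (g : List (List String)) (hn : 0 ≤ n)
    (hlen : n ≤ (g.length : Int))
    (hrow : ∀ row ∈ g.take n.toNat, n ≤ (row.length : Int)) :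
    ((g.take n.toNat).map (fun row => row.take n.toNat)).flatten
      = (pvCells n).map (pvLab g) := by
  set m := n.toNat with hm
  have hnm : n = (m : Int) := (Int.toNat_of_nonneg hn).symm
  have hmlen : m ≤ g.length := by omega
  have hstep1 : (g.take m).map (fun row => row.take m)
      = (g.take m).map (fun row => (List.range m).map (fun c => row.getD c "")) := by
    apply List.map_congr_left
    intro row hrowmem
    have := hrow row hrowmem
    exact pv_take_eq_map_range row "" m (by omega)
  rw [hstep1, pv_take_eq_map_range g ([] : List String) m hmlen, List.map_map]
  rw [← List.flatMap_def]
  show _ = ((PySem.List.pyRange 0 n 1) ×ˢ (PySem.List.pyRange 0 n 1)).map (pvLab g)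
  rw [hnm, PySem.List.pyRange_zero_natCast, pv_map_product, List.flatMap_map]
  refine congrArg (fun f => List.flatMap f (List.range m)) (funext fun r => ?_)
  simp [List.map_map, Function.comp_def, pvLab, PySem.List.pyGetD_natCast]

theorem pv_cells_nodup (n : Int) (hn : 0 ≤ n) : (pvCells n).Nodup := by
  have hnm : n = ((n.toNat : Nat) : Int) := (Int.toNat_of_nonneg hn).symm
  have h1 : (PySem.List.pyRange 0 n 1).Nodup := by
    rw [hnm, PySem.List.pyRange_zero_natCast]
    exact (List.nodup_range).map (fun a b h => by exact_mod_cast h)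
  exact h1.product h1

theorem pv_count_eq (n : Int) (g : List (List String)) (stars : List (Int × Int))
    (L : String) (hn : 0 ≤ n) :
    ((pvCells n).filter (fun rc => pvLab g rc == L)).countP (fun rc => stars.contains rc)
      = ((((PySem.Set.ofList stars).filter
            (fun rc => decide (0 ≤ rc.1 ∧ rc.1 < n ∧ 0 ≤ rc.2 ∧ rc.2 < n))).map (pvLab g)).count L) := by
  rw [List.count_eq_countP, List.countP_map, List.countP_filter, List.countP_filter]
  rw [List.countP_eq_length_filter, List.countP_eq_length_filter]
  apply List.Perm.length_eq
  rw [List.perm_ext_iff_of_nodup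
    (((pv_cells_nodup n hn)).filter _)
    ((PySem.Set.nodup_ofList stars).filter _)]
  rintro ⟨r, c⟩
  simp only [List.mem_filter, Function.comp_def, pvCells, List.mem_product,
    PySem.List.mem_pyRange_one, PySem.Set.mem_ofList, Bool.and_eq_true,
    decide_eq_true_eq, List.contains_iff_mem]
  tauto

theorem pv_B_eq (n k : Int) (g : List (List String)) (stars : List (Int × Int))
    (hn : 0 ≤ n) (hlen : n ≤ (g.length : Int))
    (hrow : ∀ row ∈ g.take n.toNat, n ≤ (row.length : Int)) :
    verify_region_grid_py_alt n k g stars =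
      (((PySem.Set.ofList ((pvCells n).map (pvLab g))).all (fun L =>
          (((((PySem.Set.ofList stars).filter
                (fun rc => decide (0 ≤ rc.1 ∧ rc.1 < n ∧ 0 ≤ rc.2 ∧ rc.2 < n))).map (pvLab g)).count L : Int) == k)))
        && !(((pvCells n).map (pvLab g)).any (fun s => s == ""))) := by
  simp only [verify_region_grid_py_alt]
  rw [pv_foldl_ite_filter (fun rc : Int × Int => 0 ≤ rc.1 ∧ rc.1 < n ∧ 0 ≤ rc.2 ∧ rc.2 < n)
    (fun d rc => PySem.Dict.insert d (PySem.List.pyGetD (PySem.List.pyGetD g rc.1 []) rc.2 "")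
      (d.getD (PySem.List.pyGetD (PySem.List.pyGetD g rc.1 []) rc.2 "") 0 + 1))
    (PySem.Set.ofList stars) PySem.Dict.empty]
  have hgetD : ∀ L : String,
      (((PySem.Set.ofList stars).filter
          (fun rc => decide (0 ≤ rc.1 ∧ rc.1 < n ∧ 0 ≤ rc.2 ∧ rc.2 < n))).foldl
        (fun d rc => PySem.Dict.insert d (PySem.List.pyGetD (PySem.List.pyGetD g rc.1 []) rc.2 "")
          (d.getD (PySem.List.pyGetD (PySem.List.pyGetD g rc.1 []) rc.2 "") 0 + 1))
        PySem.Dict.empty).getD L 0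
      = ((((PySem.Set.ofList stars).filter
            (fun rc => decide (0 ≤ rc.1 ∧ rc.1 < n ∧ 0 ≤ rc.2 ∧ rc.2 < n))).map (pvLab g)).count L : Int) := by
    intro L
    have h := PySem.Dict.getD_foldl_insert_add_one
      (((PySem.Set.ofList stars).filter
          (fun rc => decide (0 ≤ rc.1 ∧ rc.1 < n ∧ 0 ≤ rc.2 ∧ rc.2 < n))).map (pvLab g))
      (PySem.Dict.empty) L
    rw [List.foldl_map] at h
    simpa [pvLab] using h
  rw [PySem.List.slice_to g hn]
  have hinner : (fun (p : PySem.Set String × Bool) row =>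
        (PySem.List.slice row none (some n)).foldl
          (fun p lab => (PySem.Set.add p.1 lab, p.2 || (lab == ""))) p)
      = (fun (p : PySem.Set String × Bool) row =>
        (row.take n.toNat).foldl
          (fun p lab => (PySem.Set.add p.1 lab, p.2 || (lab == ""))) p) := by
    funext p row
    rw [PySem.List.slice_to row hn]
  rw [hinner]
  have hst : ((g.take n.toNat).foldl (fun (p : PySem.Set String × Bool) row =>
        (row.take n.toNat).foldl
          (fun p lab => (PySem.Set.add p.1 lab, p.2 || (lab == ""))) p) (PySem.Set.empty, false))
      = ((((pvCells n).map (pvLab g)).foldl PySem.Set.add PySem.Set.empty),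
          (((pvCells n).map (pvLab g)).any (fun s => s == ""))) := by
    rw [show ((g.take n.toNat).foldl (fun (p : PySem.Set String × Bool) row =>
          (row.take n.toNat).foldl
            (fun p lab => (PySem.Set.add p.1 lab, p.2 || (lab == ""))) p) (PySem.Set.empty, false))
        = (((g.take n.toNat).map (fun row => row.take n.toNat)).flatten.foldl
            (fun (p : PySem.Set String × Bool) lab => (PySem.Set.add p.1 lab, p.2 || (lab == "")))
            (PySem.Set.empty, false)) from by
      rw [List.foldl_flatten, List.foldl_map]]
    rw [pv_flat_eq n g hn hlen hrow]
    rw [PySem.List.foldl_prod_mk PySem.Set.add (fun b lab => b || (lab == ""))]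
    rw [pv_foldl_or, Bool.false_or]
  rw [hst]
  rw [show (((pvCells n).map (pvLab g)).foldl PySem.Set.add PySem.Set.empty)
      = PySem.Set.ofList ((pvCells n).map (pvLab g)) from
    (PySem.Set.ofList_eq_foldl _).symm]
  congr 1
  apply List.all_congr rfl
  intro L
  rw [hgetD L]

-- ===== VERDICT (by name: the statement is the Claim_ definition above) =====
theorem verify_region_grid_py_spec : Claim_equal_verify_region_grid_py := by
  intro n k g stars _hdom hpre
  obtain ⟨hn, hlen, hrow⟩ := hpre
  unfold Spec_verify_region_grid_py
  rw [pv_A_eq, pv_B_eq n k g stars hn hlen hrow]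
  congr 1
  · apply List.all_congr rfl
    intro L
    rw [pv_count_eq n g stars L hn]
  · simp [List.all_eq_not_any_not, List.any_map, Function.comp_def]
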